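-- pv_equiv track=rewrite | github.com/rakeshAtWork/Stats_Code | DSA/Divide and Concure/findMaxMinFromPortal.py | findMaxandMin
-- ===== SOURCE A (Python) =====
-- def findMaxandMin(arr, i, j):
--     ## small problem
--     ## single element present in an array
--     if i == j:
--         max_val = arr[i]
--         min_val = arr[i]
--     ## two element present in an array
--     elif i == j - 1:
--         if arr[i] < arr[j]:
--             max_val = arr[j]
--             min_val = arr[i]
--         else:
--             max_val = arr[i]
--             min_val = arr[j]
--     ## big problem -> Divide and Conquer Approach
--     else:
--         ## Divide
--         mid = i + (j-i)//2
--         ## Recursion -> conquer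
--         max_l, min_l = findMaxandMin(arr, i, mid)
--         max_r, min_r = findMaxandMin(arr, mid+1, j)
--         ## combine
--         ## to find the final max_val
--         if max_l < max_r:
--             max_val = max_r
--         else:
--             max_val = max_l
--         ## to find the final min_val
--         if min_l < min_r:
--             min_val = min_l
--         else:
--             min_val = min_r
--
--     return max_val, min_val
-- ===== SOURCE B (Python) =====
-- def findMaxandMin(arr, i, j):
--     # Single linear scan maintaining running max/min (replaces divide-and-conquer).
--     max_val = min_val = arr[i]
--     for k in range(i + 1, j + 1):
--         x = arr[k]
--         if x > max_val:
--             max_val = x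
--         if x < min_val:
--             min_val = x
--     return max_val, min_val
-- ===== Notes on version B (the rewrite author's own statement) =====
-- stated objective: simpler
-- what changed: Replaces the recursive divide-and-conquer with a single flat linear scan keeping running max/min.
import Mathlib
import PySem

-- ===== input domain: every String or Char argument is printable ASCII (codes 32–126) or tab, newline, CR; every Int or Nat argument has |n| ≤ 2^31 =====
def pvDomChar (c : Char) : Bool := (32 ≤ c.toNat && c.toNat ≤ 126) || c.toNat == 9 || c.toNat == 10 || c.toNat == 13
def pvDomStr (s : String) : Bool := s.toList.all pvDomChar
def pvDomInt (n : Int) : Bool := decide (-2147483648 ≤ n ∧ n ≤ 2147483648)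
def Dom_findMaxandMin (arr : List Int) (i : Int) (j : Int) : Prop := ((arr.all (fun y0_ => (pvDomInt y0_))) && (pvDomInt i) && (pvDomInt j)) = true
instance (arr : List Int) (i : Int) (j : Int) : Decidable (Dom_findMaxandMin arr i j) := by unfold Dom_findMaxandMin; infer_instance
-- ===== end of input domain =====

-- B replaces A's divide-and-conquer recursion with one flat linear scan keeping running max/min
-- (objective: simpler). Equivalence is claimed on i ≤ j with all indices in range (Pre_).

-- ===== PORT A =====
-- A's recursion does not terminate for i > j (Python RecursionError); the fuel only makes the
-- Lean function total — (j-i).toNat + 1 fuel is proved sufficient on Pre_ and never exhausted there.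
def findMaxandMinGo (arr : List Int) (fuel : Nat) (i j : Int) : Int × Int :=
  match fuel with
  | 0 => (0, 0)
  | fuel + 1 =>
    if i = j then
      (PySem.List.pyGetD arr i 0, PySem.List.pyGetD arr i 0)
    else if i = j - 1 then
      if PySem.List.pyGetD arr i 0 < PySem.List.pyGetD arr j 0 then
        (PySem.List.pyGetD arr j 0, PySem.List.pyGetD arr i 0)
      else
        (PySem.List.pyGetD arr i 0, PySem.List.pyGetD arr j 0)
    else
      let mid := i + PySem.Int.floordiv (j - i) 2
      let l := findMaxandMinGo arr fuel i mid
      let r := findMaxandMinGo arr fuel (mid + 1) j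
      ((if l.1 < r.1 then r.1 else l.1), (if l.2 < r.2 then l.2 else r.2))

def findMaxandMin (arr : List Int) (i : Int) (j : Int) : Int × Int :=
  findMaxandMinGo arr ((j - i).toNat + 1) i j

-- ===== PORT B =====
def findMaxandMin_alt (arr : List Int) (i : Int) (j : Int) : Int × Int :=
  (PySem.List.pyRange (i + 1) (j + 1) 1).foldl
    (fun s k =>
      let x := PySem.List.pyGetD arr k 0
      ((if s.1 < x then x else s.1), (if x < s.2 then x else s.2)))
    (PySem.List.pyGetD arr i 0, PySem.List.pyGetD arr i 0)

-- ===== PRECONDITION & SPEC =====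
-- Pre_: exactly the inputs on which Python A returns (i ≤ j and every accessed index in range);
-- for i > j A recurses forever (RecursionError), out of range raises IndexError.
def Pre_findMaxandMin (arr : List Int) (i : Int) (j : Int) : Prop :=
  i ≤ j ∧ -(arr.length : Int) ≤ i ∧ j < (arr.length : Int)
instance (arr : List Int) (i : Int) (j : Int) : Decidable (Pre_findMaxandMin arr i j) := by
  unfold Pre_findMaxandMin; infer_instance
def pvWitness_findMaxandMin : List Int × Int × Int := ([3, 1, 4, 1, 5], 1, 3)

def Spec_findMaxandMin (arr : List Int) (i : Int) (j : Int) (out : Int × Int) : Prop := out = findMaxandMin_alt arr i j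
instance (arr : List Int) (i : Int) (j : Int) (out : Int × Int) : Decidable (Spec_findMaxandMin arr i j out) := by unfold Spec_findMaxandMin; infer_instance

-- ===== CLAIM (what is proved, stated in full; the proofs are below) =====
def Claim_equal_findMaxandMin : Prop := ∀ (arr : List Int) (i : Int) (j : Int), Dom_findMaxandMin arr i j → Pre_findMaxandMin arr i j → Spec_findMaxandMin arr i j (findMaxandMin arr i j)

-- ===== LEMMAS AND PROOFS =====

-- abbreviations used only in the proofs
def pvG (arr : List Int) (k : Int) : Int := PySem.List.pyGetD arr k 0

def pvStep (arr : List Int) (s : Int × Int) (k : Int) : Int × Int :=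
  let x := pvG arr k
  ((if s.1 < x then x else s.1), (if x < s.2 then x else s.2))

lemma alt_eq_fold (arr : List Int) (i j : Int) :
    findMaxandMin_alt arr i j =
      (PySem.List.pyRange (i + 1) (j + 1) 1).foldl (pvStep arr) (pvG arr i, pvG arr i) := rfl

lemma step_eq_maxmin (arr : List Int) (s : Int × Int) (k : Int) :
    pvStep arr s k = (max s.1 (pvG arr k), min s.2 (pvG arr k)) := by
  simp only [pvStep]
  refine Prod.ext ?_ ?_
  · show (if s.1 < pvG arr k then pvG arr k else s.1) = max s.1 (pvG arr k)
    rw [max_def]; split_ifs <;> omega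
  · show (if pvG arr k < s.2 then pvG arr k else s.2) = min s.2 (pvG arr k)
    rw [min_def]; split_ifs <;> omega

lemma fold_step_eq (arr : List Int) (L : List Int) (M m : Int) :
    L.foldl (pvStep arr) (M, m) =
      (L.foldl (fun a k => max a (pvG arr k)) M, L.foldl (fun a k => min a (pvG arr k)) m) := by
  induction L generalizing M m with
  | nil => rfl
  | cons x L ih => simp only [List.foldl_cons, step_eq_maxmin]; exact ih _ _

lemma foldl_max_max (arr : List Int) (L : List Int) (a b : Int) :
    L.foldl (fun a k => max a (pvG arr k)) (max a b) =
      max a (L.foldl (fun a k => max a (pvG arr k)) b) := by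
  induction L generalizing b with
  | nil => rfl
  | cons x L ih => simpa [max_assoc] using ih (max b (pvG arr x))

lemma foldl_min_min (arr : List Int) (L : List Int) (a b : Int) :
    L.foldl (fun a k => min a (pvG arr k)) (min a b) =
      min a (L.foldl (fun a k => min a (pvG arr k)) b) := by
  induction L generalizing b with
  | nil => rfl
  | cons x L ih => simpa [min_assoc] using ih (min b (pvG arr x))

lemma pyRange_split (a b c : Int) (hab : a ≤ b) (hbc : b ≤ c) :
    PySem.List.pyRange a c 1 = PySem.List.pyRange a b 1 ++ PySem.List.pyRange b c 1 := by
  have h : ∀ n : Nat, ∀ a : Int, a ≤ b → (b - a).toNat = n →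
      PySem.List.pyRange a c 1 = PySem.List.pyRange a b 1 ++ PySem.List.pyRange b c 1 := by
    intro n
    induction n with
    | zero =>
      intro a ha h0
      have : a = b := by omega
      subst this
      rw [PySem.List.pyRange_one_eq_nil le_rfl]; rfl
    | succ n ih =>
      intro a ha h0
      have hlt : a < b := by omega
      rw [PySem.List.pyRange_one_cons (by omega : a < c),
          PySem.List.pyRange_one_cons hlt, List.cons_append,
          ih (a + 1) (by omega) (by omega)]
  exact h (b - a).toNat a hab rfl

-- B on [i..j] splits at any i ≤ mid < j into the combine of the two halves.
lemma alt_split (arr : List Int) (i mid j : Int) (h1 : i ≤ mid) (h2 : mid < j) :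
    findMaxandMin_alt arr i j =
      ((if (findMaxandMin_alt arr i mid).1 < (findMaxandMin_alt arr (mid + 1) j).1
        then (findMaxandMin_alt arr (mid + 1) j).1 else (findMaxandMin_alt arr i mid).1),
       (if (findMaxandMin_alt arr i mid).2 < (findMaxandMin_alt arr (mid + 1) j).2
        then (findMaxandMin_alt arr i mid).2 else (findMaxandMin_alt arr (mid + 1) j).2)) := by
  rw [alt_eq_fold arr i j, alt_eq_fold arr i mid, alt_eq_fold arr (mid + 1) j]
  rw [pyRange_split (i + 1) (mid + 1) (j + 1) (by omega) (by omega),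
      PySem.List.pyRange_one_cons (by omega : mid + 1 < j + 1)]
  rw [List.foldl_append, List.foldl_cons]
  rw [fold_step_eq, fold_step_eq, fold_step_eq]
  rw [step_eq_maxmin]
  simp only []
  rw [foldl_max_max, foldl_min_min]
  set Ml := (PySem.List.pyRange (i + 1) (mid + 1) 1).foldl (fun a k => max a (pvG arr k)) (pvG arr i)
  set ml := (PySem.List.pyRange (i + 1) (mid + 1) 1).foldl (fun a k => min a (pvG arr k)) (pvG arr i)
  set Mr := (PySem.List.pyRange (mid + 1 + 1) (j + 1) 1).foldl (fun a k => max a (pvG arr k)) (pvG arr (mid + 1))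
  set mr := (PySem.List.pyRange (mid + 1 + 1) (j + 1) 1).foldl (fun a k => min a (pvG arr k)) (pvG arr (mid + 1))
  refine Prod.ext ?_ ?_
  · show max Ml Mr = if Ml < Mr then Mr else Ml
    rw [max_def]; split_ifs <;> omega
  · show min ml mr = if ml < mr then ml else mr
    rw [min_def]; split_ifs <;> omega

lemma go_eq_alt (arr : List Int) (fuel : Nat) :
    ∀ i j : Int, i ≤ j → (j - i).toNat < fuel →
      findMaxandMinGo arr fuel i j = findMaxandMin_alt arr i j := by
  induction fuel with
  | zero => intro i j _ h; omega
  | succ fuel ih =>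
    intro i j hij hf
    by_cases h0 : i = j
    · subst h0
      simp only [findMaxandMinGo, if_pos]
      rw [alt_eq_fold, PySem.List.pyRange_one_eq_nil (by omega)]
      rfl
    · by_cases h1 : i = j - 1
      · simp only [findMaxandMinGo, if_neg h0, if_pos h1]
        rw [alt_eq_fold,
            PySem.List.pyRange_one_cons (by omega : i + 1 < j + 1),
            PySem.List.pyRange_one_eq_nil (by omega : j + 1 ≤ i + 1 + 1)]
        have hij' : i + 1 = j := by omega
        rw [hij']
        simp only [List.foldl_cons, List.foldl_nil, pvStep, pvG]
        rcases lt_trichotomy (PySem.List.pyGetD arr i 0) (PySem.List.pyGetD arr j 0) with h | h | h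
        · simp [h, asymm h]
        · simp [h]
        · simp [h, asymm h]
      · have hd : 2 ≤ j - i := by omega
        have hfd : PySem.Int.floordiv (j - i) 2 = (j - i) / 2 :=
          PySem.Int.floordiv_eq_ediv_of_pos (by omega)
        simp only [findMaxandMinGo, if_neg h0, if_neg h1]
        set mid := i + PySem.Int.floordiv (j - i) 2 with hmid
        have hm1 : i ≤ mid := by rw [hmid, hfd]; omega
        have hm2 : mid < j := by rw [hmid, hfd]; omega
        rw [ih i mid hm1 (by rw [hmid, hfd]; omega),
            ih (mid + 1) j (by omega) (by rw [hmid, hfd]; omega)]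
        exact (alt_split arr i mid j hm1 hm2).symm

-- ===== VERDICT (by name: the statement is the Claim_ definition above) =====
theorem findMaxandMin_spec : Claim_equal_findMaxandMin := by
  intro arr i j _ hpre
  unfold Spec_findMaxandMin findMaxandMin
  exact go_eq_alt arr _ i j hpre.1 (by omega)
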